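-- pv_equiv track=rewrite | github.com/ArkMeteor-Ayuu/SlicerPro | app.py | parse_selected_cells
-- ===== SOURCE A (Python) =====
-- from typing import Any
--
-- def parse_selected_cells(
--     grid_rows: int,
--     grid_cols: int,
--     require: bool,
--     raw_cells: Any,
-- ) -> list[int]:
--     if not require:
--         return []
--     if not isinstance(raw_cells, list):
--         raise ValueError("Selected cells must be a list.")
--     max_cells = grid_rows * grid_cols
--     parsed: set[int] = set()
--     for item in raw_cells:
--         try:
--             idx = int(item)
--         except (TypeError, ValueError):
--             raise ValueError("Selected cells must contain numeric indexes.") from None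
--         if idx < 0 or idx >= max_cells:
--             raise ValueError("Selected cell index is out of range for the selected grid.")
--         parsed.add(idx)
--     if not parsed:
--         raise ValueError("Select at least one cell when selector mode is enabled.")
--     return sorted(parsed)
-- ===== SOURCE B (Python) =====
-- def _distinct_sorted(xs):
--     # Quicksort-style partition around the first element; duplicates of the
--     # pivot vanish because both partitions use strict comparisons.
--     if not xs:
--         return []
--     pivot = xs[0]
--     rest = xs[1:]
--     return (_distinct_sorted([x for x in rest if x < pivot])
--             + [pivot]
--             + _distinct_sorted([x for x in rest if x > pivot]))
--
-- def parse_selected_cells(grid_rows, grid_cols, require, raw_cells):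
--     if not require:
--         return []
--     if not isinstance(raw_cells, list):
--         raise ValueError("Selected cells must be a list.")
--     max_cells = grid_rows * grid_cols
--     vals = []
--     for item in raw_cells:
--         try:
--             idx = int(item)
--         except (TypeError, ValueError):
--             raise ValueError("Selected cells must contain numeric indexes.") from None
--         if idx < 0 or idx >= max_cells:
--             raise ValueError("Selected cell index is out of range for the selected grid.")
--         vals.append(idx)
--     if not vals:
--         raise ValueError("Select at least one cell when selector mode is enabled.")
--     return _distinct_sorted(vals)
-- ===== Notes on version B (the rewrite author's own statement) =====
-- stated objective: alternative
-- what changed: B replaces A's hash-set accumulation followed by the library comparison sort with a recursive divide-and-conquer: a quicksort-style partition around the first element whose strict-inequality partitions discard duplicates of the pivot, so sortedness and dedup both come from the recursion with no set and no sort call.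
import Mathlib
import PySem

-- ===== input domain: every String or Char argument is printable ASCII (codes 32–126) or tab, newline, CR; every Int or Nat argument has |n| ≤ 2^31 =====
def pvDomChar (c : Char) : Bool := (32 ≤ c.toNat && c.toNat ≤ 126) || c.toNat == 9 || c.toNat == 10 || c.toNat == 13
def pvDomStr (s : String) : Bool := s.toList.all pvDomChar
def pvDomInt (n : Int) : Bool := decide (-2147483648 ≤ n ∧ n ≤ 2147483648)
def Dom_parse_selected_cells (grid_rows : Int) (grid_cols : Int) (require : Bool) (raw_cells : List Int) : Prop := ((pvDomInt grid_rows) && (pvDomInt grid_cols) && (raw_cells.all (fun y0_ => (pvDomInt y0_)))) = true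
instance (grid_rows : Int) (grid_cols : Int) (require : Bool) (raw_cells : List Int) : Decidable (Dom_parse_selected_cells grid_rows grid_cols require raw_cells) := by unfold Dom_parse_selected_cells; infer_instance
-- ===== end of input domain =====

-- B replaces A's set-accumulate-then-library-sort by a recursive quicksort-style partition whose strict comparisons drop duplicates (alternative algorithm, same task).


-- ===== PORT A =====
-- A: accumulate the indexes into a set, then return sorted(set).
-- A's three 'raise' statements (non-numeric item, out-of-range index, empty selection)
-- are exactly the inputs Pre_ excludes (items are already Int here, so only the last two arise).
def parse_selected_cells (grid_rows : Int) (grid_cols : Int) (require : Bool) (raw_cells : List Int) : List Int :=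
  if !require then []
  else
    let parsed : PySem.Set Int := raw_cells.foldl (fun s item => PySem.Set.add s item) PySem.Set.empty
    PySem.List.sorted parsed (fun x => x) false

-- ===== PORT B =====
-- B's helper _distinct_sorted: quicksort-style partition around the first element;
-- both partitions use strict comparisons, so duplicates of the pivot vanish.
def pvDistinctSorted : List Int → List Int
  | [] => []
  | pivot :: rest =>
    pvDistinctSorted (rest.filter (fun x => decide (x < pivot))) ++
      pivot :: pvDistinctSorted (rest.filter (fun x => decide (pivot < x)))
termination_by xs => xs.length
decreasing_by
  all_goals
    simp only [List.length_unattach, List.length_cons]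
    exact Nat.lt_succ_of_le (le_trans (List.length_filter_le _ _) (by simp))

-- B: the validation loop appends each index to 'vals' (inside Pre_ no item raises),
-- then returns _distinct_sorted(vals).
def parse_selected_cells_alt (grid_rows : Int) (grid_cols : Int) (require : Bool) (raw_cells : List Int) : List Int :=
  if !require then []
  else
    let vals : List Int := raw_cells.foldl (fun acc idx => acc ++ [idx]) []
    pvDistinctSorted vals

-- ===== PRECONDITION & SPEC =====
-- Pre_ excludes exactly the inputs where A raises ValueError: with require=true, an empty
-- selection or an index outside [0, grid_rows*grid_cols).
def Pre_parse_selected_cells (grid_rows : Int) (grid_cols : Int) (require : Bool) (raw_cells : List Int) : Prop :=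
  require = true → (raw_cells ≠ [] ∧ ∀ i ∈ raw_cells, 0 ≤ i ∧ i < grid_rows * grid_cols)
instance (grid_rows : Int) (grid_cols : Int) (require : Bool) (raw_cells : List Int) : Decidable (Pre_parse_selected_cells grid_rows grid_cols require raw_cells) := by unfold Pre_parse_selected_cells; infer_instance

def pvWitness_parse_selected_cells : Int × Int × Bool × List Int := (2, 2, true, [3, 0, 3, 1])

def Spec_parse_selected_cells (grid_rows : Int) (grid_cols : Int) (require : Bool) (raw_cells : List Int) (out : List Int) : Prop := out = parse_selected_cells_alt grid_rows grid_cols require raw_cells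
instance (grid_rows : Int) (grid_cols : Int) (require : Bool) (raw_cells : List Int) (out : List Int) : Decidable (Spec_parse_selected_cells grid_rows grid_cols require raw_cells out) := by unfold Spec_parse_selected_cells; infer_instance

-- ===== CLAIM (what is proved, stated in full; the proofs are below) =====
def Claim_equal_parse_selected_cells : Prop := ∀ (grid_rows : Int) (grid_cols : Int) (require : Bool) (raw_cells : List Int), Dom_parse_selected_cells grid_rows grid_cols require raw_cells → Pre_parse_selected_cells grid_rows grid_cols require raw_cells → Spec_parse_selected_cells grid_rows grid_cols require raw_cells (parse_selected_cells grid_rows grid_cols require raw_cells)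

-- ===== LEMMAS AND PROOFS =====

-- The append-accumulating fold of B's validation loop collects the list itself.
theorem pvFoldAppend (raw : List Int) : ∀ acc : List Int,
    raw.foldl (fun acc idx => acc ++ [idx]) acc = acc ++ raw := by
  induction raw with
  | nil => simp
  | cons x t ih => intro acc; simp [List.foldl_cons, ih]

-- The quicksort-with-dedup helper returns a strictly increasing list with the same members.
theorem pvQS_spec : ∀ (n : Nat) (xs : List Int), xs.length ≤ n →
    (pvDistinctSorted xs).Pairwise (· < ·) ∧ (∀ x, x ∈ pvDistinctSorted xs ↔ x ∈ xs) := by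
  intro n
  induction n with
  | zero =>
    intro xs h
    have : xs = [] := List.eq_nil_of_length_eq_zero (Nat.le_zero.mp h)
    subst this
    exact ⟨by simp [pvDistinctSorted], fun x => by simp [pvDistinctSorted]⟩
  | succ m ih =>
    intro xs h
    match xs with
    | [] => exact ⟨by simp [pvDistinctSorted], fun x => by simp [pvDistinctSorted]⟩
    | p :: rest =>
      have hlen : rest.length ≤ m := by simpa using h
      obtain ⟨pwL, memL⟩ := ih (rest.filter (fun x => decide (x < p)))
        (le_trans (List.length_filter_le _ _) hlen)
      obtain ⟨pwR, memR⟩ := ih (rest.filter (fun x => decide (p < x)))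
        (le_trans (List.length_filter_le _ _) hlen)
      have hLlt : ∀ a ∈ pvDistinctSorted (rest.filter (fun x => decide (x < p))), a < p := by
        intro a ha
        exact of_decide_eq_true (List.mem_filter.mp ((memL a).mp ha)).2
      have hRgt : ∀ b ∈ pvDistinctSorted (rest.filter (fun x => decide (p < x))), p < b := by
        intro b hb
        exact of_decide_eq_true (List.mem_filter.mp ((memR b).mp hb)).2
      constructor
      · rw [pvDistinctSorted, List.pairwise_append]
        refine ⟨pwL, ?_, ?_⟩
        · rw [List.pairwise_cons]
          exact ⟨hRgt, pwR⟩
        · intro a ha b hb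
          rcases List.mem_cons.mp hb with rfl | hb
          · exact hLlt a ha
          · exact lt_trans (hLlt a ha) (hRgt b hb)
      · intro x
        rw [pvDistinctSorted]
        simp only [List.mem_append, List.mem_cons, memL, memR, List.mem_filter,
          decide_eq_true_eq]
        constructor
        · rintro (⟨hx, -⟩ | rfl | ⟨hx, -⟩)
          · exact Or.inr hx
          · exact Or.inl rfl
          · exact Or.inr hx
        · rintro (rfl | hx)
          · exact Or.inr (Or.inl rfl)
          · rcases lt_trichotomy x p with hlt | rfl | hgt
            · exact Or.inl ⟨hx, hlt⟩
            · exact Or.inr (Or.inl rfl)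
            · exact Or.inr (Or.inr ⟨hx, hgt⟩)

-- ===== VERDICT (by name: the statement is the Claim_ definition above) =====
theorem parse_selected_cells_spec : Claim_equal_parse_selected_cells := by
  intro gr gc require raw _ _
  unfold Spec_parse_selected_cells parse_selected_cells parse_selected_cells_alt
  cases require with
  | false => simp
  | true =>
    simp only [Bool.not_true, Bool.false_eq_true, if_false]
    have hfold : raw.foldl (fun s item => PySem.Set.add s item) PySem.Set.empty = PySem.Set.ofList raw := by
      rw [PySem.Set.ofList_eq_foldl]; rfl
    rw [hfold, pvFoldAppend raw [], List.nil_append]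
    obtain ⟨hpw, hmem⟩ := pvQS_spec raw.length raw le_rfl
    have hperm : (pvDistinctSorted raw).Perm (PySem.Set.ofList raw) := by
      rw [List.perm_ext_iff_of_nodup (hpw.imp fun h => ne_of_lt h) (PySem.Set.nodup_ofList raw)]
      intro x
      rw [hmem x, PySem.Set.mem_ofList]
    exact PySem.List.sorted_eq_of_perm_of_pairwise_lt _ _ (fun x => x) hperm (by simpa using hpw)
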